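-- pv_equiv track=rewrite | github.com/HoangcoderIkci/NewCodes | cipher/SolveSystemFinitePoleMatrixBacThang.py | createArrayMultModule
-- ===== SOURCE A (Python) =====
-- def createArrayMultModule(module):
--     temp = 0
--     arrMultiple2 = [[0] * module for i in range(module)]
--     arrInverseSubtraction2 = [0] * module
--     for i in range(module):
--         for j in range(i, module):
--             temp = (i * j) % module
--             arrMultiple2[i][j] = temp
--             arrMultiple2[j][i] = temp
--             if temp == 1:
--                 arrInverseSubtraction2[i] = j
--                 arrInverseSubtraction2[j] = i
--     return arrMultiple2, arrInverseSubtraction2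
-- ===== SOURCE B (Python) =====
-- def createArrayMultModule(module):
--     # First pass: materialize the full multiplication table with a direct double comprehension.
--     arrMultiple2 = [[(i * j) % module for j in range(module)] for i in range(module)]
--     # Second pass: read each row for the unique entry equal to one; default zero when none.
--     arrInverseSubtraction2 = [row.index(1) if 1 in row else 0 for row in arrMultiple2]
--     return arrMultiple2, arrInverseSubtraction2
-- ===== Notes on version B (the rewrite author's own statement) =====
-- stated objective: simpler
-- what changed: Replaces the single triangular in-place loop that fills both symmetric cells and records inverses inline with two separate passes: a full double comprehension building the whole table, then a per-row scan for the unit entry to read off each inverse.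
import Mathlib
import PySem

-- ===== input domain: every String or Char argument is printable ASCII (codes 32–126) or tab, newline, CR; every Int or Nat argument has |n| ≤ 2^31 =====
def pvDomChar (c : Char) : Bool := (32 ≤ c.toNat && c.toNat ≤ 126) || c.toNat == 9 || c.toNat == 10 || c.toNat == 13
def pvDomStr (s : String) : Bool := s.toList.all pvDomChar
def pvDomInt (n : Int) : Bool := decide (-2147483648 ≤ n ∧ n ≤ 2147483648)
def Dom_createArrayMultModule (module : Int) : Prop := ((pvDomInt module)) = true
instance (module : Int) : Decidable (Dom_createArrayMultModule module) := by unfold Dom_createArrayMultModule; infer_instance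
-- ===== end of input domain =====

-- B builds the full multiplication table with a double comprehension and reads inverses off each row
-- in a separate pass, instead of A's single triangular loop writing both symmetric cells and inverses in place.

-- ===== PORT A =====
-- literal port of A's triangular in-place loop; all indices written are in range, so pySetD/modify are exact
def createArrayMultModule (module : Int) : List (List Int) × List Int :=
  let arrMultiple2 := (PySem.List.pyRange 0 module 1).map
    (fun _ => PySem.List.pyRepeat [(0 : Int)] module)
  let arrInverseSubtraction2 := PySem.List.pyRepeat [(0 : Int)] module
  (PySem.List.pyRange 0 module 1).foldl (fun st i =>
    (PySem.List.pyRange i module 1).foldl (fun st j =>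
      let temp := PySem.Int.mod (i * j) module
      let t1 := st.1.modify i.toNat (fun row => PySem.List.pySetD row j temp)
      let t2 := t1.modify j.toNat (fun row => PySem.List.pySetD row i temp)
      if temp = 1 then
        (t2, PySem.List.pySetD (PySem.List.pySetD st.2 i j) j i)
      else (t2, st.2)) st) (arrMultiple2, arrInverseSubtraction2)

-- ===== PORT B =====
def createArrayMultModule_alt (module : Int) : List (List Int) × List Int :=
  let table := (PySem.List.pyRange 0 module 1).map (fun i =>
    (PySem.List.pyRange 0 module 1).map (fun j => PySem.Int.mod (i * j) module))
  let inv := table.map (fun row =>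
    match PySem.List.index? row 1 with
    | some k => (k : Int)
    | none => 0)
  (table, inv)

-- ===== PRECONDITION & SPEC =====
def Spec_createArrayMultModule (module : Int) (out : List (List Int) × List Int) : Prop := out = createArrayMultModule_alt module
instance (module : Int) (out : List (List Int) × List Int) : Decidable (Spec_createArrayMultModule module out) := by unfold Spec_createArrayMultModule; infer_instance

-- ===== CLAIM (what is proved, stated in full; the proofs are below) =====
def Claim_equal_createArrayMultModule : Prop := ∀ (module : Int), Dom_createArrayMultModule module → Spec_createArrayMultModule module (createArrayMultModule module)

-- ===== LEMMAS AND PROOFS =====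

-- table-update half of A's loop body
def pvF (m : Int) (t : List (List Int)) (p : Int × Int) : List (List Int) :=
  (t.modify p.1.toNat (fun row => PySem.List.pySetD row p.2 (PySem.Int.mod (p.1 * p.2) m))).modify
    p.2.toNat (fun row => PySem.List.pySetD row p.1 (PySem.Int.mod (p.1 * p.2) m))

-- inverse-update half of A's loop body
def pvG (m : Int) (v : List Int) (p : Int × Int) : List Int :=
  if PySem.Int.mod (p.1 * p.2) m = 1 then
    PySem.List.pySetD (PySem.List.pySetD v p.1 p.2) p.2 p.1
  else v

-- the (i, j) pairs A's triangular double loop visits, in order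
def pvPairs (m : Int) : List (Int × Int) :=
  (PySem.List.pyRange 0 m 1).flatMap (fun i => (PySem.List.pyRange i m 1).map (fun j => (i, j)))

-- the inverse value B's row scan yields for residue a
def pvInvF (m a : Int) : Int :=
  match PySem.List.index? ((PySem.List.pyRange 0 m 1).map (fun j => PySem.Int.mod (a * j) m)) 1 with
  | some k => (k : Int)
  | none => 0

def pvCell (t : List (List Int)) (a b : Nat) : Option Int := t[a]?.bind (fun r => r[b]?)

lemma pv_nested_flatMap {s : Type} (f : s → Int × Int → s) (xs : List Int) (g : Int → List Int)
    (init : s) :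
    xs.foldl (fun st i => ((g i).map (fun j => (i, j))).foldl f st) init
      = (xs.flatMap (fun i => (g i).map (fun j => (i, j)))).foldl f init := by
  induction xs generalizing init with
  | nil => rfl
  | cons x t ih => simp only [List.flatMap_cons, List.foldl_append, List.foldl_cons, ih]

lemma pvA_eq_foldl (m : Int) :
    createArrayMultModule m =
      ((pvPairs m).foldl (pvF m)
        ((PySem.List.pyRange 0 m 1).map (fun _ => PySem.List.pyRepeat [(0 : Int)] m)),
       (pvPairs m).foldl (pvG m) (PySem.List.pyRepeat [(0 : Int)] m)) := by
  have hinner : ∀ i : Int,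
      (fun (st : List (List Int) × List Int) (j : Int) =>
        let temp := PySem.Int.mod (i * j) m
        let t1 := st.1.modify i.toNat (fun row => PySem.List.pySetD row j temp)
        let t2 := t1.modify j.toNat (fun row => PySem.List.pySetD row i temp)
        if temp = 1 then
          (t2, PySem.List.pySetD (PySem.List.pySetD st.2 i j) j i)
        else (t2, st.2))
      = fun st j => (pvF m st.1 (i, j), pvG m st.2 (i, j)) := by
    intro i; funext st j
    by_cases h : PySem.Int.mod (i * j) m = 1 <;> simp [pvF, pvG, h]
  show (PySem.List.pyRange 0 m 1).foldl _ _ = _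
  calc (PySem.List.pyRange 0 m 1).foldl (fun st i =>
        (PySem.List.pyRange i m 1).foldl (fun st j =>
          let temp := PySem.Int.mod (i * j) m
          let t1 := st.1.modify i.toNat (fun row => PySem.List.pySetD row j temp)
          let t2 := t1.modify j.toNat (fun row => PySem.List.pySetD row i temp)
          if temp = 1 then
            (t2, PySem.List.pySetD (PySem.List.pySetD st.2 i j) j i)
          else (t2, st.2)) st)
        ((PySem.List.pyRange 0 m 1).map (fun _ => PySem.List.pyRepeat [(0 : Int)] m),
         PySem.List.pyRepeat [(0 : Int)] m)
      = (PySem.List.pyRange 0 m 1).foldl (fun st i =>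
          ((PySem.List.pyRange i m 1).map (fun j => (i, j))).foldl
            (fun st p => (pvF m st.1 p, pvG m st.2 p)) st)
        ((PySem.List.pyRange 0 m 1).map (fun _ => PySem.List.pyRepeat [(0 : Int)] m),
         PySem.List.pyRepeat [(0 : Int)] m) := by
        refine congrFun (congrFun (congrArg _ ?_) _) _
        funext st i
        rw [hinner i, List.foldl_map]
    _ = _ := by
        rw [pv_nested_flatMap]
        exact PySem.List.foldl_prod_mk _ _ _ _ _

lemma pvPairs_bounds (m : Int) : ∀ p ∈ pvPairs m, 0 ≤ p.1 ∧ p.1 ≤ p.2 ∧ p.2 < m := by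
  intro p hp
  simp only [pvPairs, List.mem_flatMap, List.mem_map] at hp
  obtain ⟨i, hi, j, hj, rfl⟩ := hp
  rw [PySem.List.mem_pyRange_one] at hi hj
  exact ⟨hi.1, hj.1, hj.2⟩

lemma pv_cov (m a b : Int) (ha : 0 ≤ a) (ha2 : a < m) (hb : 0 ≤ b) (hb2 : b < m) :
    ∃ p ∈ pvPairs m, (p.1 = a ∧ p.2 = b) ∨ (p.1 = b ∧ p.2 = a) := by
  refine ⟨(min a b, max a b), ?_, ?_⟩
  · simp only [pvPairs, List.mem_flatMap, List.mem_map]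
    refine ⟨min a b, ?_, max a b, ?_, rfl⟩
    · rw [PySem.List.mem_pyRange_one]; omega
    · rw [PySem.List.mem_pyRange_one]; omega
  · rcases le_total a b with h | h
    · left; simp [min_eq_left h, max_eq_right h]
    · right; simp [min_eq_right h, max_eq_left h]

lemma pv_mod_uniq (m a x y : Int) (hm : 0 < m) (hx : 0 ≤ x) (hx2 : x < m) (hy : 0 ≤ y)
    (hy2 : y < m) (h1 : PySem.Int.mod (a * x) m = 1) (h2 : PySem.Int.mod (a * y) m = 1) :
    x = y := by
  rw [PySem.Int.mod_eq_emod_of_pos hm] at h1 h2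
  by_cases hm1 : m = 1
  · subst hm1; omega
  have h1m : (1 : Int) % m = 1 := Int.emod_eq_of_lt (by norm_num) (by omega)
  have hax : Int.ModEq m (a * x) 1 := by unfold Int.ModEq; rw [h1, h1m]
  have hay : Int.ModEq m (a * y) 1 := by unfold Int.ModEq; rw [h2, h1m]
  have e : Int.ModEq m (x * 1) (y * 1) := by
    calc x * 1 ≡ x * (a * y) [ZMOD m] := (Int.ModEq.mul_left x hay).symm
      _ = y * (a * x) := by ring
      _ ≡ y * 1 [ZMOD m] := Int.ModEq.mul_left y hax
  have e' : x % m = y % m := by simpa using e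
  rw [Int.emod_eq_of_lt hx hx2, Int.emod_eq_of_lt hy hy2] at e'
  exact e'

lemma pvInvF_eq (m a b : Int) (hm : 0 < m) (_ha : 0 ≤ a) (hb : 0 ≤ b) (hbm : b < m)
    (h : PySem.Int.mod (a * b) m = 1) : pvInvF m a = b := by
  have hmem : (1 : Int) ∈ (PySem.List.pyRange 0 m 1).map (fun j => PySem.Int.mod (a * j) m) := by
    rw [List.mem_map]
    exact ⟨b, by rw [PySem.List.mem_pyRange_one]; omega, h⟩
  rw [← PySem.List.index?_isSome_iff] at hmem
  obtain ⟨k, hk⟩ := Option.isSome_iff_exists.mp hmem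
  obtain ⟨hklt, hkv, -⟩ := PySem.List.getElem_of_index?_eq_some hk
  have hlen : ((PySem.List.pyRange 0 m 1).map (fun j => PySem.Int.mod (a * j) m)).length
      = (m - 0).toNat := by
    rw [List.length_map, PySem.List.length_pyRange_one]
  have hkv' : PySem.Int.mod (a * (0 + (k : Int))) m = 1 := by
    rw [List.getElem_map] at hkv
    rw [PySem.List.getElem_pyRange_one] at hkv
    exact hkv
  have hkb : (k : Int) = b := by
    refine pv_mod_uniq m a _ b hm (Int.natCast_nonneg k) ?_ hb hbm (by simpa using hkv') h
    rw [hlen] at hklt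
    omega
  unfold pvInvF
  rw [hk]
  exact hkb

lemma pvInvF_eq_zero (m a : Int)
    (h : ∀ j, 0 ≤ j → j < m → PySem.Int.mod (a * j) m ≠ 1) : pvInvF m a = 0 := by
  have hnone : PySem.List.index?
      ((PySem.List.pyRange 0 m 1).map (fun j => PySem.Int.mod (a * j) m)) 1 = none := by
    rw [PySem.List.index?_eq_none_iff]
    intro hmem
    rw [List.mem_map] at hmem
    obtain ⟨j, hj, hj1⟩ := hmem
    rw [PySem.List.mem_pyRange_one] at hj
    exact h j hj.1 hj.2 hj1
  unfold pvInvF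
  rw [hnone]

-- one step of the inverse-array update, read at index a
lemma pvG_getElem (m : Int) (hm : 0 < m) (v : List Int) (p : Int × Int) (a : Int)
    (hp1 : 0 ≤ p.1) (hp12 : p.1 ≤ p.2) (hp2 : p.2 < m) (ha : 0 ≤ a) (ham : a < m)
    (hlen : v.length = m.toNat) :
    (pvG m v p)[a.toNat]? =
      if (p.1 = a ∨ p.2 = a) ∧ PySem.Int.mod (p.1 * p.2) m = 1
      then some (pvInvF m a) else v[a.toNat]? := by
  unfold pvG
  by_cases ht : PySem.Int.mod (p.1 * p.2) m = 1
  · rw [if_pos ht, PySem.List.pySetD_of_nonneg _ _ hp1,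
      PySem.List.pySetD_of_nonneg _ _ (le_trans hp1 hp12)]
    by_cases h2a : p.2 = a
    · rw [if_pos ⟨Or.inr h2a, ht⟩, List.getElem?_set,
        if_pos (by omega : p.2.toNat = a.toNat),
        if_pos (by rw [List.length_set]; omega)]
      have : pvInvF m a = p.1 := by
        refine pvInvF_eq m a p.1 hm ha hp1 (lt_of_le_of_lt hp12 hp2) ?_
        rw [mul_comm, ← h2a]
        exact ht
      rw [this]
    · by_cases h1a : p.1 = a
      · rw [if_pos ⟨Or.inl h1a, ht⟩, List.getElem?_set,
          if_neg (by omega : ¬ p.2.toNat = a.toNat), List.getElem?_set,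
          if_pos (by omega : p.1.toNat = a.toNat), if_pos (by omega)]
        have : pvInvF m a = p.2 := by
          refine pvInvF_eq m a p.2 hm ha (le_trans hp1 hp12) hp2 ?_
          rw [← h1a]
          exact ht
        rw [this]
      · rw [if_neg (by rintro ⟨h | h, -⟩; exact h1a h; exact h2a h),
          List.getElem?_set, if_neg (by omega : ¬ p.2.toNat = a.toNat),
          List.getElem?_set, if_neg (by omega : ¬ p.1.toNat = a.toNat)]
  · rw [if_neg ht, if_neg (by rintro ⟨-, h⟩; exact ht h)]

-- fold characterization of the inverse array
lemma pvG_foldl (m : Int) (hm : 0 < m) (ps : List (Int × Int)) (v : List Int)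
    (hlen : v.length = m.toNat) (hb : ∀ p ∈ ps, 0 ≤ p.1 ∧ p.1 ≤ p.2 ∧ p.2 < m) :
    (ps.foldl (pvG m) v).length = m.toNat ∧
    ∀ a : Int, 0 ≤ a → a < m →
      (ps.foldl (pvG m) v)[a.toNat]? =
        if ∃ p ∈ ps, (p.1 = a ∨ p.2 = a) ∧ PySem.Int.mod (p.1 * p.2) m = 1
        then some (pvInvF m a) else v[a.toNat]? := by
  induction ps generalizing v with
  | nil => simp [hlen]
  | cons p t ih =>
    obtain ⟨hp1, hp12, hp2⟩ := hb p List.mem_cons_self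
    have hlen' : (pvG m v p).length = v.length := by
      unfold pvG
      split
      · rw [PySem.List.length_pySetD, PySem.List.length_pySetD]
      · rfl
    obtain ⟨ihlen, ihcell⟩ := ih (pvG m v p) (by omega)
      (fun q hq => hb q (List.mem_cons_of_mem _ hq))
    refine ⟨ihlen, ?_⟩
    intro a ha ham
    rw [List.foldl_cons, ihcell a ha ham,
      pvG_getElem m hm v p a hp1 hp12 hp2 ha ham hlen]
    by_cases h1 : ∃ q ∈ t, (q.1 = a ∨ q.2 = a) ∧ PySem.Int.mod (q.1 * q.2) m = 1
    · obtain ⟨q, hq, hqt⟩ := h1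
      rw [if_pos ⟨q, hq, hqt⟩, if_pos ⟨q, List.mem_cons_of_mem _ hq, hqt⟩]
    · rw [if_neg h1]
      by_cases h2 : (p.1 = a ∨ p.2 = a) ∧ PySem.Int.mod (p.1 * p.2) m = 1
      · rw [if_pos h2, if_pos ⟨p, List.mem_cons_self, h2⟩]
      · rw [if_neg h2, if_neg ?_]
        rintro ⟨q, hq, hqt⟩
        rcases List.mem_cons.mp hq with rfl | hq'
        · exact h2 hqt
        · exact h1 ⟨q, hq', hqt⟩

-- one step of the table update, read at cell (a, b)
lemma pvF_cell (m : Int) (t : List (List Int)) (p : Int × Int) (a b : Int)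
    (hp1 : 0 ≤ p.1) (hp12 : p.1 ≤ p.2) (hp2 : p.2 < m)
    (ha : 0 ≤ a) (ham : a < m) (hb : 0 ≤ b) (hbm : b < m)
    (hlen : t.length = m.toNat)
    (hrows : ∀ (k : Nat) (r : List Int), t[k]? = some r → r.length = m.toNat) :
    pvCell (pvF m t p) a.toNat b.toNat =
      if (p.1 = a ∧ p.2 = b) ∨ (p.1 = b ∧ p.2 = a)
      then some (PySem.Int.mod (a * b) m) else pvCell t a.toNat b.toNat := by
  have hat : a.toNat < t.length := by omega
  obtain ⟨r0, hr0⟩ : ∃ r0, t[a.toNat]? = some r0 :=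
    ⟨t[a.toNat], List.getElem?_eq_getElem hat⟩
  have hr0len : r0.length = m.toNat := hrows _ _ hr0
  have hbr : b.toNat < r0.length := by omega
  have hp2n : (0 : Int) ≤ p.2 := le_trans hp1 hp12
  unfold pvF pvCell
  rw [List.getElem?_modify, List.getElem?_modify, hr0]
  simp only [Option.map_eq_map, Option.map_some, Option.bind_some]
  simp only [PySem.List.pySetD_of_nonneg _ _ hp1, PySem.List.pySetD_of_nonneg _ _ hp2n]
  by_cases h2a : p.2 = a
  · rw [if_pos (by omega : p.2.toNat = a.toNat)]
    by_cases h1b : p.1 = b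
    · -- f2 sets column p.1 = b
      have hcond : (p.1 = a ∧ p.2 = b) ∨ (p.1 = b ∧ p.2 = a) := Or.inr ⟨h1b, h2a⟩
      rw [if_pos hcond]
      by_cases h1a : p.1 = a
      · rw [if_pos (by omega : p.1.toNat = a.toNat), List.getElem?_set,
          if_pos (by omega : p.1.toNat = b.toNat),
          if_pos (by rw [List.length_set]; omega)]
        rw [show p.1 * p.2 = a * b by rw [h1b, h2a, mul_comm]]
      · rw [if_neg (by omega : ¬ p.1.toNat = a.toNat), List.getElem?_set,
          if_pos (by omega : p.1.toNat = b.toNat), if_pos (by omega)]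
        rw [show p.1 * p.2 = a * b by rw [h1b, h2a, mul_comm]]
    · -- f2 sets a column ≠ b
      rw [List.getElem?_set, if_neg (by omega : ¬ p.1.toNat = b.toNat)]
      by_cases h1a : p.1 = a
      · -- also f1 applied; its column p.2 = a; is it b?  p.2 = b → a = b → p.1 = b, contra
        have h2b : ¬ p.2 = b := by omega
        rw [if_pos (by omega : p.1.toNat = a.toNat), List.getElem?_set,
          if_neg (by omega : ¬ p.2.toNat = b.toNat),
          if_neg (by rintro (⟨-, h⟩ | ⟨h, -⟩); exact h2b h; exact h1b h)]
      · rw [if_neg (by omega : ¬ p.1.toNat = a.toNat),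
          if_neg (by rintro (⟨h, -⟩ | ⟨h, -⟩); exact h1a h; exact h1b h)]
  · rw [if_neg (by omega : ¬ p.2.toNat = a.toNat)]
    by_cases h1a : p.1 = a
    · rw [if_pos (by omega : p.1.toNat = a.toNat)]
      by_cases h2b : p.2 = b
      · rw [if_pos (Or.inl ⟨h1a, h2b⟩), List.getElem?_set,
          if_pos (by omega : p.2.toNat = b.toNat), if_pos (by omega)]
        rw [h1a, h2b]
      · rw [List.getElem?_set, if_neg (by omega : ¬ p.2.toNat = b.toNat),
          if_neg (by rintro (⟨-, h⟩ | ⟨-, h⟩); exact h2b h; exact h2a h)]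
    · rw [if_neg (by omega : ¬ p.1.toNat = a.toNat),
        if_neg (by rintro (⟨h, -⟩ | ⟨-, h⟩); exact h1a h; exact h2a h)]

lemma pvF_rows (m : Int) (t : List (List Int)) (p : Int × Int)
    (hrows : ∀ (k : Nat) (r : List Int), t[k]? = some r → r.length = m.toNat) :
    ∀ (k : Nat) (r : List Int), (pvF m t p)[k]? = some r → r.length = m.toNat := by
  intro k r h
  unfold pvF at h
  rw [List.getElem?_modify, List.getElem?_modify] at h
  cases hk : t[k]? with
  | none => rw [hk] at h; simp at h
  | some r0 =>
    rw [hk] at h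
    simp only [Option.map_eq_map, Option.map_some, Option.some_inj] at h
    have := hrows _ _ hk
    subst h
    by_cases h1 : p.1.toNat = k <;> by_cases h2 : p.2.toNat = k <;>
      simp [h1, h2, PySem.List.length_pySetD, this]

-- fold characterization of the multiplication table
lemma pvF_foldl (m : Int) (ps : List (Int × Int)) (t : List (List Int))
    (hlen : t.length = m.toNat)
    (hrows : ∀ (k : Nat) (r : List Int), t[k]? = some r → r.length = m.toNat)
    (hb : ∀ p ∈ ps, 0 ≤ p.1 ∧ p.1 ≤ p.2 ∧ p.2 < m) :
    (ps.foldl (pvF m) t).length = m.toNat ∧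
    (∀ (k : Nat) (r : List Int), (ps.foldl (pvF m) t)[k]? = some r → r.length = m.toNat) ∧
    ∀ a b : Int, 0 ≤ a → a < m → 0 ≤ b → b < m →
      pvCell (ps.foldl (pvF m) t) a.toNat b.toNat =
        if ∃ p ∈ ps, (p.1 = a ∧ p.2 = b) ∨ (p.1 = b ∧ p.2 = a)
        then some (PySem.Int.mod (a * b) m) else pvCell t a.toNat b.toNat := by
  induction ps generalizing t with
  | nil => exact ⟨hlen, hrows, by simp⟩
  | cons p tl ih =>
    obtain ⟨hp1, hp12, hp2⟩ := hb p List.mem_cons_self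
    have hlen' : (pvF m t p).length = t.length := by
      unfold pvF; rw [List.length_modify, List.length_modify]
    obtain ⟨ihlen, ihrows, ihcell⟩ := ih (pvF m t p) (by omega) (pvF_rows m t p hrows)
      (fun q hq => hb q (List.mem_cons_of_mem _ hq))
    refine ⟨ihlen, ihrows, ?_⟩
    intro a b ha ham hbb hbm
    rw [List.foldl_cons, ihcell a b ha ham hbb hbm,
      pvF_cell m t p a b hp1 hp12 hp2 ha ham hbb hbm hlen hrows]
    by_cases h1 : ∃ q ∈ tl, (q.1 = a ∧ q.2 = b) ∨ (q.1 = b ∧ q.2 = a)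
    · obtain ⟨q, hq, hqt⟩ := h1
      rw [if_pos ⟨q, hq, hqt⟩, if_pos ⟨q, List.mem_cons_of_mem _ hq, hqt⟩]
    · rw [if_neg h1]
      by_cases h2 : (p.1 = a ∧ p.2 = b) ∨ (p.1 = b ∧ p.2 = a)
      · rw [if_pos h2, if_pos ⟨p, List.mem_cons_self, h2⟩]
      · rw [if_neg h2, if_neg ?_]
        rintro ⟨q, hq, hqt⟩
        rcases List.mem_cons.mp hq with rfl | hq'
        · exact h2 hqt
        · exact h1 ⟨q, hq', hqt⟩

-- ===== VERDICT (by name: the statement is the Claim_ definition above) =====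
theorem createArrayMultModule_spec : Claim_equal_createArrayMultModule := by
  intro m _
  show createArrayMultModule m = createArrayMultModule_alt m
  by_cases hm : 0 < m
  · obtain ⟨n, rfl⟩ : ∃ n : Nat, m = (n : Int) := ⟨m.toNat, (Int.toNat_of_nonneg hm.le).symm⟩
    have hn : 0 < n := by exact_mod_cast hm
    have htoNat : ((n : Int)).toNat = n := Int.toNat_natCast n
    -- initial arrays
    have hinitlen : ((PySem.List.pyRange 0 (n : Int) 1).map
        (fun _ => PySem.List.pyRepeat [(0 : Int)] (n : Int))).length = n := by
      rw [List.length_map, PySem.List.length_pyRange_one]; omega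
    have hinitrows : ∀ (k : Nat) (r : List Int),
        ((PySem.List.pyRange 0 (n : Int) 1).map
          (fun _ => PySem.List.pyRepeat [(0 : Int)] (n : Int)))[k]? = some r →
        r.length = ((n : Int)).toNat := by
      intro k r h
      rw [List.getElem?_map] at h
      cases hk : (PySem.List.pyRange 0 (n : Int) 1)[k]? with
      | none => rw [hk] at h; simp at h
      | some x =>
        rw [hk] at h
        simp only [Option.map_some, Option.some_inj] at h
        rw [← h, PySem.List.pyRepeat_singleton, List.length_replicate]
    have hinit2len : (PySem.List.pyRepeat [(0 : Int)] (n : Int)).length = ((n : Int)).toNat := by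
      rw [PySem.List.pyRepeat_singleton, List.length_replicate]
    rw [pvA_eq_foldl]
    obtain ⟨hAlen, hArows, hAcell⟩ := pvF_foldl (n : Int) (pvPairs (n : Int))
      ((PySem.List.pyRange 0 (n : Int) 1).map (fun _ => PySem.List.pyRepeat [(0 : Int)] (n : Int)))
      (by rw [hinitlen, htoNat]) hinitrows (pvPairs_bounds _)
    obtain ⟨hA2len, hA2cell⟩ := pvG_foldl (n : Int) hm (pvPairs (n : Int))
      (PySem.List.pyRepeat [(0 : Int)] (n : Int)) hinit2len (pvPairs_bounds _)
    have hBinv : (createArrayMultModule_alt (n : Int)).2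
        = (PySem.List.pyRange 0 (n : Int) 1).map (fun i => pvInvF (n : Int) i) := by
      simp only [createArrayMultModule_alt, List.map_map]
      rfl
    have hBtab : (createArrayMultModule_alt (n : Int)).1
        = (PySem.List.pyRange 0 (n : Int) 1).map (fun i =>
            (PySem.List.pyRange 0 (n : Int) 1).map (fun j => PySem.Int.mod (i * j) (n : Int))) :=
      rfl
    refine Prod.ext ?_ ?_
    · -- tables
      rw [hBtab]
      refine List.ext_getElem? ?_
      intro k
      by_cases hk : k < n
      · -- both rows defined; compare them cellwise
        set T := (pvPairs (n : Int)).foldl (pvF (n : Int))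
          ((PySem.List.pyRange 0 (n : Int) 1).map
            (fun _ => PySem.List.pyRepeat [(0 : Int)] (n : Int))) with hT
        have hkT : k < T.length := by rw [hAlen]; omega
        have hTk : T[k]? = some T[k] := List.getElem?_eq_getElem hkT
        have hrowlen : T[k].length = n := by
          have := hArows k T[k] hTk
          omega
        rw [PySem.List.getElem?_map_pyRange_zero _ n k hk, hTk]
        congr 1
        refine List.ext_getElem? ?_
        intro l
        by_cases hl : l < n
        · have hcell := hAcell (k : Int) (l : Int) (Int.natCast_nonneg k)
            (by exact_mod_cast hk) (Int.natCast_nonneg l) (by exact_mod_cast hl)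
          rw [if_pos (pv_cov (n : Int) (k : Int) (l : Int) (Int.natCast_nonneg k)
            (by exact_mod_cast hk) (Int.natCast_nonneg l) (by exact_mod_cast hl))] at hcell
          simp only [pvCell, hTk, Int.toNat_natCast, Option.bind_some] at hcell
          rw [hcell, PySem.List.getElem?_map_pyRange_zero _ n l hl]
        · rw [List.getElem?_eq_none (by omega : T[k].length ≤ l),
            List.getElem?_eq_none (by rw [List.length_map, PySem.List.length_pyRange_one]; omega)]
      · rw [List.getElem?_eq_none (by rw [hAlen]; omega),
          List.getElem?_eq_none (by rw [List.length_map, PySem.List.length_pyRange_one]; omega)]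
    · -- inverse arrays
      rw [hBinv]
      refine List.ext_getElem? ?_
      intro k
      by_cases hk : k < n
      · rw [PySem.List.getElem?_map_pyRange_zero _ n k hk]
        have hcell := hA2cell (k : Int) (Int.natCast_nonneg k) (by exact_mod_cast hk)
        rw [Int.toNat_natCast] at hcell
        rw [hcell]
        by_cases hcov : ∃ p ∈ pvPairs (n : Int), (p.1 = (k : Int) ∨ p.2 = (k : Int)) ∧
            PySem.Int.mod (p.1 * p.2) (n : Int) = 1
        · rw [if_pos hcov]
        · rw [if_neg hcov, PySem.List.pyRepeat_singleton,
            List.getElem?_replicate, if_pos (by omega : k < ((n : Int)).toNat)]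
          have : pvInvF (n : Int) (k : Int) = 0 := by
            refine pvInvF_eq_zero _ _ ?_
            intro j hj hjn h1
            obtain ⟨p, hp, hpt⟩ := pv_cov (n : Int) (k : Int) j (Int.natCast_nonneg k)
              (by exact_mod_cast hk) hj hjn
            refine hcov ⟨p, hp, ?_, ?_⟩
            · rcases hpt with ⟨h, -⟩ | ⟨-, h⟩
              · exact Or.inl h
              · exact Or.inr h
            · rcases hpt with ⟨h1', h2'⟩ | ⟨h1', h2'⟩
              · rw [h1', h2']; exact h1
              · rw [h1', h2', mul_comm]; exact h1
          rw [this]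
      · rw [List.getElem?_eq_none (by rw [hA2len, htoNat]; omega),
          List.getElem?_eq_none (by rw [List.length_map, PySem.List.length_pyRange_one]; omega)]
  · -- module ≤ 0: both sides are ([], [])
    have h0 : PySem.List.pyRange 0 m 1 = [] := PySem.List.pyRange_one_eq_nil (by omega)
    have h1 : PySem.List.pyRepeat [(0 : Int)] m = [] := by
      rw [PySem.List.pyRepeat_singleton, (by omega : m.toNat = 0), List.replicate_zero]
    show (PySem.List.pyRange 0 m 1).foldl _ _ = _
    rw [h0]
    show ((([] : List Int).map _ : List (List Int)), PySem.List.pyRepeat [(0 : Int)] m) = _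
    rw [h1]
    show (([] : List (List Int)), ([] : List Int)) = createArrayMultModule_alt m
    unfold createArrayMultModule_alt
    rw [h0]
    rfl
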